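-- pv_equiv track=rewrite | github.com/pypi-data/pypi-mirror-401 | packages/smc-lammps/smc_lammps-0.2.1-py3-none-any.whl/smc_lammps/post_process/process_displacement.py | split_into_index_groups
-- ===== SOURCE A (Python) =====
-- from typing import Any, Sequence
--
-- def is_sorted(lst: Sequence[Any]) -> bool:
--     return all(lst[i] <= lst[i + 1] for i in range(len(lst) - 1))
--
-- def split_into_index_groups(indices: Sequence[int], margin: int = 1) -> list[list[int]]:
--     """splits a (sorted) list of integers into groups of adjacent integers.
--     adjacent means within [value, value + margin] (both bounds inclusive)."""
--
--     if margin < 0: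
--         raise ValueError("Margin cannot be negative.")
--
--     if not indices:
--         return []
--
--     if not is_sorted(indices):
--         raise ValueError("indices must be sorted")
--
--     groups = [[indices[0]]]
--     for index in indices[1:]:
--         if groups[-1][-1] <= index and index <= groups[-1][-1] + margin:
--             groups[-1].append(index)
--         else:
--             groups.append([index])
--
--     return groups
-- ===== SOURCE B (Python) =====
-- def split_into_index_groups(indices, margin=1):
--     """splits a (sorted) list of integers into groups of adjacent integers
--     by recursively slicing off the longest leading run whose consecutive
--     gaps are all <= margin."""
--
--     if margin < 0:
--         raise ValueError("Margin cannot be negative.")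
--
--     if not indices:
--         return []
--
--     xs = list(indices)
--
--     if any(xs[i] > xs[i + 1] for i in range(len(xs) - 1)):
--         raise ValueError("indices must be sorted")
--
--     def run_length(prev, rest):
--         # number of leading elements of rest that continue the run after prev
--         k = 0
--         for v in rest:
--             if v - prev > margin:
--                 break
--             prev = v
--             k += 1
--         return k
--
--     def rec(ys):
--         if not ys:
--             return []
--         k = run_length(ys[0], ys[1:])
--         return [ys[:k + 1]] + rec(ys[k + 1:])
--
--     return rec(xs)
-- ===== Notes on version B (the rewrite author's own statement) =====
-- stated objective: alternative
-- what changed: Replaced A's single-pass append-or-new-group accumulation into a mutable nested list with a two-phase decomposition: compute the length of the leading within-margin run, slice it off, and recurse on the remainder.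
import Mathlib
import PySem

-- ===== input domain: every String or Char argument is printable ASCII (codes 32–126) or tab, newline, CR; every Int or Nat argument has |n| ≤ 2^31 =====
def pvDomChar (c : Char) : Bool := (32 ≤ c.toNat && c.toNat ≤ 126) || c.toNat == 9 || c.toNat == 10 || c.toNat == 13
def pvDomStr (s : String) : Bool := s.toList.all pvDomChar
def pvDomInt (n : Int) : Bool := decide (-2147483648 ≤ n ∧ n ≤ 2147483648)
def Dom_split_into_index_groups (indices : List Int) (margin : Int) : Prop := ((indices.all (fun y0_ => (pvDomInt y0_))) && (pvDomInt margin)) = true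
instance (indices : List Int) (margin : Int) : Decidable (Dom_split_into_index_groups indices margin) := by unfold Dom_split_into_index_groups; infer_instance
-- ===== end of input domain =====

-- B replaces A's append-or-new-group accumulation by a run-length-then-slice recursion; same cost, different decomposition.


-- ===== PORT A =====
-- is_sorted: all adjacent pairs lst[i] <= lst[i+1]
def pvIsSorted : List Int → Bool
  | [] => true
  | [_] => true
  | x :: y :: r => x ≤ y && pvIsSorted (y :: r)

-- the for-loop of A; groups is always nonempty with a nonempty last group, so
-- groups[-1][-1] is ported exactly by getLastD/getLastD, and the in-place
-- append to groups[-1] by dropLast ++ [last ++ [i]].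
def pvLoopA (margin : Int) (gs : List (List Int)) : List Int → List (List Int)
  | [] => gs
  | i :: xs =>
    let lastv := (gs.getLastD []).getLastD 0
    if lastv ≤ i ∧ i ≤ lastv + margin then
      pvLoopA margin (gs.dropLast ++ [gs.getLastD [] ++ [i]]) xs
    else
      pvLoopA margin (gs ++ [[i]]) xs

def split_into_index_groups (indices : List Int) (margin : Int) : List (List Int) :=
  if margin < 0 then []            -- Python raises ValueError here; excluded by Pre_
  else match indices with
  | [] => []
  | x :: rest =>
    if !pvIsSorted (x :: rest) then []   -- Python raises ValueError here; excluded by Pre_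
    else pvLoopA margin [[x]] rest

-- ===== PORT B =====
-- run_length(prev, rest): leading elements of rest continuing the run after prev
def pvRunLen (margin prev : Int) : List Int → Nat
  | [] => 0
  | v :: rest => if v - prev > margin then 0 else pvRunLen margin v rest + 1

-- rec(ys): slice off the leading run, recurse on the remainder
def pvRecB (margin : Int) : List Int → List (List Int)
  | [] => []
  | x :: rest =>
    let k := pvRunLen margin x rest
    (x :: rest.take k) :: pvRecB margin (rest.drop k)
termination_by l => l.length
decreasing_by simp

def split_into_index_groups_alt (indices : List Int) (margin : Int) : List (List Int) :=
  if margin < 0 then []            -- Python raises ValueError here; excluded by Pre_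
  else match indices with
  | [] => []
  | x :: rest =>
    if !pvIsSorted (x :: rest) then []   -- Python raises ValueError here; excluded by Pre_
    else pvRecB margin (x :: rest)

-- ===== PRECONDITION & SPEC =====
-- A raises ValueError when margin < 0 or the list is not ascending; exactly those inputs are excluded.
def Pre_split_into_index_groups (indices : List Int) (margin : Int) : Prop :=
  0 ≤ margin ∧ List.IsChain (· ≤ ·) indices
instance (indices : List Int) (margin : Int) : Decidable (Pre_split_into_index_groups indices margin) := by
  unfold Pre_split_into_index_groups; infer_instance

def pvWitness_split_into_index_groups : List Int × Int := ([1, 2, 5, 6], 1)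

def Spec_split_into_index_groups (indices : List Int) (margin : Int) (out : List (List Int)) : Prop := out = split_into_index_groups_alt indices margin
instance (indices : List Int) (margin : Int) (out : List (List Int)) : Decidable (Spec_split_into_index_groups indices margin out) := by unfold Spec_split_into_index_groups; infer_instance

-- ===== CLAIM (what is proved, stated in full; the proofs are below) =====
def Claim_equal_split_into_index_groups : Prop := ∀ (indices : List Int) (margin : Int), Dom_split_into_index_groups indices margin → Pre_split_into_index_groups indices margin → Spec_split_into_index_groups indices margin (split_into_index_groups indices margin)

-- ===== LEMMAS AND PROOFS =====
lemma pvRecB_nil (margin : Int) : pvRecB margin [] = [] := by rw [pvRecB]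

lemma pvRecB_cons (margin x : Int) (rest : List Int) :
    pvRecB margin (x :: rest) =
      (x :: rest.take (pvRunLen margin x rest)) :: pvRecB margin (rest.drop (pvRunLen margin x rest)) := by
  rw [pvRecB]

lemma pvIsSorted_of_chain : ∀ (l : List Int), List.IsChain (· ≤ ·) l → pvIsSorted l = true
  | [], _ => rfl
  | [_], _ => rfl
  | x :: y :: r, h => by
    rw [List.isChain_cons_cons] at h
    simp [pvIsSorted, h.1, pvIsSorted_of_chain (y :: r) h.2]

-- loop invariant: A's loop with accumulator gs ++ [cur] (cur nonempty, last p)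
-- produces gs, then cur extended by the current run, then B's recursion on the rest
lemma pvLoopA_eq (margin : Int) (hm : 0 ≤ margin) :
    ∀ (xs : List Int) (gs : List (List Int)) (cur : List Int) (p : Int),
      cur.getLast? = some p → List.IsChain (· ≤ ·) (p :: xs) →
      pvLoopA margin (gs ++ [cur]) xs =
        gs ++ (cur ++ xs.take (pvRunLen margin p xs)) :: pvRecB margin (xs.drop (pvRunLen margin p xs))
  | [], gs, cur, p, _, _ => by simp [pvLoopA, pvRunLen, pvRecB_nil]
  | i :: xs, gs, cur, p, hlast, hch => by
    rw [List.isChain_cons_cons] at hch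
    have hlastD : (gs ++ [cur]).getLastD [] = cur := by simp
    have hcl : cur.getLastD 0 = p := by
      cases cur with
      | nil => simp at hlast
      | cons a t => simp [List.getLastD_eq_getLast?, hlast]
    unfold pvLoopA
    simp only [hlastD, hcl]
    by_cases hgap : i - p > margin
    · have hcond : ¬ (p ≤ i ∧ i ≤ p + margin) := by omega
      rw [if_neg hcond]
      rw [pvLoopA_eq margin hm xs (gs ++ [cur]) [i] i (by simp) hch.2]
      simp only [pvRunLen, if_pos hgap, List.take_zero, List.drop_zero, List.append_nil,
        List.append_assoc, List.singleton_append, pvRecB_cons]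
    · have hcond : p ≤ i ∧ i ≤ p + margin := ⟨hch.1, by omega⟩
      rw [if_pos hcond]
      rw [show (gs ++ [cur]).dropLast = gs from by simp,
        pvLoopA_eq margin hm xs gs (cur ++ [i]) i (by simp) hch.2]
      simp [pvRunLen, hgap, List.append_assoc, List.take_succ_cons, List.drop_succ_cons]
termination_by xs => xs.length

-- ===== VERDICT (by name: the statement is the Claim_ definition above) =====
theorem split_into_index_groups_spec : Claim_equal_split_into_index_groups := by
  intro indices margin _ hpre
  obtain ⟨hm, hch⟩ := hpre
  unfold Spec_split_into_index_groups split_into_index_groups split_into_index_groups_alt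
  rw [if_neg (by omega), if_neg (by omega)]
  cases indices with
  | nil => rfl
  | cons x rest =>
    simp only [pvIsSorted_of_chain _ hch, Bool.not_true, Bool.false_eq_true, if_false]
    have h2 := pvLoopA_eq margin hm rest [] [x] x (by simp) hch
    simp only [List.nil_append] at h2
    rw [h2, pvRecB_cons]
    simp
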